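-- pv_equiv track=rewrite | github.com/azoner/pyx12 | pyx12/path.py | _is_child_path
-- ===== SOURCE A (Python) =====
-- def _is_child_path(root_path, child_path):
--     """
--     Is the child path really a child of the root path?
--     @type root_path: string
--     @type child_path: string
--     @return: True if a child
--     @rtype: boolean
--     """
--     root = root_path.split('/')
--     child = child_path.split('/')
--     if len(root) >= len(child):
--         return False
--     for i in range(len(root)):
--         if root[i] != child[i]:
--             return False
--     return True
-- ===== SOURCE B (Python) =====
-- def _is_child_path(root_path, child_path):
--     """
--     Is the child path really a child of the root path?
--     @type root_path: string
--     @type child_path: string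
--     @return: True if a child
--     @rtype: boolean
--     """
--     return child_path.startswith(root_path + '/')
-- ===== Notes on version B (the rewrite author's own statement) =====
-- stated objective: simpler
-- what changed: Replaced splitting both paths into segment lists, a length comparison and an index loop with a single startswith test against root_path + '/', which detects exactly the proper segment-child relation.
import Mathlib
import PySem

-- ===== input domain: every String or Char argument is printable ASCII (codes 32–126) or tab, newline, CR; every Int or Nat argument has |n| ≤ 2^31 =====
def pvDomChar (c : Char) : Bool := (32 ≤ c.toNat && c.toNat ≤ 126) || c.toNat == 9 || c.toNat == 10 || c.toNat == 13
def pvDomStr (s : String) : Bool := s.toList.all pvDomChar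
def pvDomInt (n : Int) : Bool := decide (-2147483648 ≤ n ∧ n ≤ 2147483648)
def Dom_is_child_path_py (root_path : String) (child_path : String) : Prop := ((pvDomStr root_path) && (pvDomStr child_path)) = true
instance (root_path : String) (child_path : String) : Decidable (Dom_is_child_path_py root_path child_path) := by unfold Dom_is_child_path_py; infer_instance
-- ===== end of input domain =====

-- B replaces A's split-into-segments + length test + index loop by one startswith test
-- against root_path ++ "/" (simpler; return value only, no side effects involved).

-- ===== PORT A =====
-- root_path.split('/') / child_path.split('/'): single-char separator, exact via PySem.Chars.splitOn on the code points
def is_child_path_py (root_path : String) (child_path : String) : Bool :=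
  let root := PySem.Chars.splitOn root_path.toList ['/']
  let child := PySem.Chars.splitOn child_path.toList ['/']
  if root.length ≥ child.length then false
  else
    -- for i in range(len(root)): if root[i] != child[i]: return False  (early exit = List.all)
    (PySem.List.pyRange 0 (root.length : Int) 1).all
      (fun i => PySem.List.pyGet? root i == PySem.List.pyGet? child i)

-- ===== PORT B =====
def is_child_path_py_alt (root_path : String) (child_path : String) : Bool :=
  PySem.Str.startswith child_path (root_path ++ "/")

-- ===== PRECONDITION & SPEC =====
def Spec_is_child_path_py (root_path : String) (child_path : String) (out : Bool) : Prop := out = is_child_path_py_alt root_path child_path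
instance (root_path : String) (child_path : String) (out : Bool) : Decidable (Spec_is_child_path_py root_path child_path out) := by unfold Spec_is_child_path_py; infer_instance

-- ===== CLAIM (what is proved, stated in full; the proofs are below) =====
def Claim_equal_is_child_path_py : Prop := ∀ (root_path : String) (child_path : String), Dom_is_child_path_py root_path child_path → Spec_is_child_path_py root_path child_path (is_child_path_py root_path child_path)

-- ===== LEMMAS AND PROOFS =====

-- PySem's fuelled splitOn with single-char separator IS Mathlib's List.splitOn.
theorem pv_go_eq (fuel : Nat) (l cur : List Char) (acc : List (List Char)) (h : l.length ≤ fuel) :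
    PySem.Chars.splitOn.go ['/'] fuel l cur acc
      = acc.reverse ++ (l.splitOnP (· == '/')).modifyHead (cur.reverse ++ ·) := by
  induction fuel generalizing l cur acc with
  | zero =>
    have : l = [] := List.length_eq_zero_iff.mp (Nat.le_zero.mp h)
    subst this
    simp [PySem.Chars.splitOn.go, List.splitOnP_nil]
  | succ n ih =>
    cases l with
    | nil => simp [PySem.Chars.splitOn.go, List.splitOnP_nil]
    | cons c rest =>
      simp only [PySem.Chars.splitOn.go]
      by_cases hc : c = '/'
      · subst hc
        rw [if_pos (by simp [List.isPrefixOf])]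
        rw [ih _ _ _ (by simpa using Nat.le_of_succ_le_succ h)]
        rw [List.splitOnP_cons]
        simp only [if_pos (by simp : ('/' == '/') = true)]
        rw [show (fun x : List Char => [].reverse ++ x) = id from by funext x; simp]
        rw [List.modifyHead_id]
        simp
      · rw [if_neg (by simp [List.isPrefixOf]; exact fun hh => hc hh.symm)]
        rw [ih _ _ _ (by simpa using Nat.le_of_succ_le_succ h)]
        rw [List.splitOnP_cons]
        rw [if_neg (by simpa using hc)]
        rw [List.modifyHead_modifyHead]
        rw [show ((fun x => cur.reverse ++ x) ∘ List.cons c) = (fun x : List Char => (c :: cur).reverse ++ x) from by funext x; simp]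

theorem pv_splitOn_eq (s : List Char) :
    PySem.Chars.splitOn s ['/'] = s.splitOn '/' := by
  rw [PySem.Chars.splitOn, pv_go_eq _ _ _ _ (Nat.le_succ _)]
  rw [show (fun x : List Char => [].reverse ++ x) = id from by funext x; simp, List.modifyHead_id]
  simp [List.splitOn]

theorem pv_modifyHead_append {α : Type} (f : α → α) (xs ys : List α) (h : xs ≠ []) :
    (xs ++ ys).modifyHead f = xs.modifyHead f ++ ys := by
  cases xs with
  | nil => exact absurd rfl h
  | cons a t => simp

-- splitting an explicit concatenation at the separator
theorem pv_splitOn_append (a t : List Char) :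
    (a ++ '/' :: t).splitOn '/' = a.splitOn '/' ++ t.splitOn '/' := by
  induction a with
  | nil => simp [List.splitOn, List.splitOnP_cons]
  | cons c a' ih =>
    simp only [List.splitOn, List.cons_append, List.splitOnP_cons] at *
    by_cases hc : c = '/'
    · simp [hc, ih]
    · rw [if_neg (by simpa using hc), if_neg (by simpa using hc), ih,
        pv_modifyHead_append _ _ _ (List.splitOnP_ne_nil _ _)]

theorem pv_intercalate_cons_cons (x : Char) (u v : List Char) (ls : List (List Char)) :
    [x].intercalate (u :: v :: ls) = u ++ x :: [x].intercalate (v :: ls) := by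
  simp [List.intercalate]

theorem pv_intercalate_append (x : Char) (xs ys : List (List Char))
    (hxs : xs ≠ []) (hys : ys ≠ []) :
    [x].intercalate (xs ++ ys) = [x].intercalate xs ++ x :: [x].intercalate ys := by
  induction xs with
  | nil => exact absurd rfl hxs
  | cons u xs' ih =>
    cases xs' with
    | nil =>
      cases ys with
      | nil => exact absurd rfl hys
      | cons v ys' => simp [List.intercalate]
    | cons w xs'' =>
      have hih := ih (by simp)
      cases ys with
      | nil => exact absurd rfl hys
      | cons v ys' =>
        simp only [List.cons_append]
        rw [pv_intercalate_cons_cons, pv_intercalate_cons_cons, ← List.cons_append, hih]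
        simp

-- the heart: proper segment-prefix of the splits ⟺ string prefix with a '/' boundary
theorem pv_main (a b : List Char) :
    (a.splitOn '/' <+: b.splitOn '/' ∧ (a.splitOn '/').length < (b.splitOn '/').length)
      ↔ (a ++ ['/']) <+: b := by
  constructor
  · rintro ⟨⟨rest, hrest⟩, hlen⟩
    have hrest_ne : rest ≠ [] := by
      intro h; subst h; simp at hrest; rw [hrest] at hlen; omega
    have ha_ne : a.splitOn '/' ≠ [] := List.splitOnP_ne_nil _ _
    have hb : b = [ '/' ].intercalate (b.splitOn '/') := (List.intercalate_splitOn b '/').symm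
    rw [← hrest, pv_intercalate_append _ _ _ ha_ne hrest_ne, List.intercalate_splitOn] at hb
    exact ⟨[ '/' ].intercalate rest, by simp [hb]⟩
  · rintro ⟨t, ht⟩
    have hb : b = a ++ '/' :: t := by simpa using ht.symm
    subst hb
    rw [pv_splitOn_append]
    refine ⟨⟨t.splitOn '/', rfl⟩, ?_⟩
    have := List.splitOnP_ne_nil (fun x => x == '/') t
    have : (t.splitOn '/').length ≠ 0 := by
      simpa [List.splitOn, List.length_eq_zero_iff] using this
    simp; omega

-- A's loop over range(len(root)) is the getElem?-wise prefix test
theorem pv_all_eq (xs ys : List (List Char)) :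
    ((PySem.List.pyRange 0 (xs.length : Int) 1).all
        (fun i => PySem.List.pyGet? xs i == PySem.List.pyGet? ys i) = true)
      ↔ ∀ k < xs.length, xs[k]? = ys[k]? := by
  rw [PySem.List.pyRange_one]
  simp only [List.all_map, List.all_eq_true, List.mem_range]
  constructor
  · intro h k hk
    have := h k hk
    simpa [PySem.List.pyGet?_natCast] using this
  · intro h k hk
    simpa [PySem.List.pyGet?_natCast] using h k hk

theorem pv_prefix_iff (xs ys : List (List Char)) :
    xs <+: ys ↔ ∀ k < xs.length, xs[k]? = ys[k]? := by
  rw [List.prefix_iff_eq_take]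
  constructor
  · intro h k hk
    conv_lhs => rw [h]
    rw [List.getElem?_take_of_lt hk]
  · intro h
    apply List.ext_getElem?
    intro k
    rw [List.getElem?_take]
    split_ifs with hk
    · exact h k hk
    · exact List.getElem?_eq_none (by omega)

-- ===== VERDICT (by name: the statement is the Claim_ definition above) =====
theorem is_child_path_py_spec : Claim_equal_is_child_path_py := by
  intro root_path child_path _
  unfold Spec_is_child_path_py is_child_path_py is_child_path_py_alt
  simp only [pv_splitOn_eq]
  apply Bool.eq_iff_iff.mpr
  rw [PySem.Str.startswith, String.toList_append]
  have hsl : ("/" : String).toList = ['/'] := rfl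
  rw [hsl, PySem.Chars.startswith_iff, ← pv_main]
  by_cases h : (root_path.toList.splitOn '/').length ≥ (child_path.toList.splitOn '/').length
  · rw [if_pos h]
    simp only [Bool.false_eq_true, false_iff]
    rintro ⟨-, hlt⟩
    omega
  · rw [if_neg h]
    rw [pv_all_eq, pv_prefix_iff]
    constructor
    · intro hp
      exact ⟨hp, by omega⟩
    · rintro ⟨hp, -⟩
      exact hp
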